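-- pv_equiv track=rewrite | github.com/chelstein/eas-station | tools/rbds_bit_permutations_test.py | calc_syndrome
-- ===== SOURCE A (Python) =====
-- def calc_syndrome(x: int, mlen: int) -> int:
--     """Calculate syndrome using RDS specification (Annex B)."""
--     reg = 0
--     plen = 10
--     for ii in range(mlen, 0, -1):
--         reg = (reg << 1) | ((x >> (ii - 1)) & 0x01)
--         if reg & (1 << plen):
--             reg = reg ^ 0x5B9
--     for ii in range(plen, 0, -1):
--         reg = reg << 1
--         if reg & (1 << plen):
--             reg = reg ^ 0x5B9
--     return reg & ((1 << plen) - 1)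
-- ===== SOURCE B (Python) =====
-- def calc_syndrome(x: int, mlen: int) -> int:
--     """Calculate syndrome using RDS specification (Annex B)."""
--     # CRC is GF(2)-linear: the syndrome is the XOR of per-bit contributions
--     # t_j = X**(j+10) mod G for each set message bit j.  Walk the message
--     # LSB-first, updating the contribution by one modular doubling per step.
--     syn = 0
--     t = 0x1B9  # X**10 mod G, contribution of message bit 0
--     for j in range(mlen):
--         if (x >> j) & 1:
--             syn ^= t
--         t <<= 1
--         if t & 0x400:
--             t ^= 0x5B9
--     return syn & 0x3FF
-- ===== Notes on version B (the rewrite author's own statement) =====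
-- stated objective: alternative
-- what changed: B replaces A's shift-register CRC division (MSB-first message pass plus a 10-step zero-padding pass) by a GF(2)-linearity superposition: it walks the message LSB-first, maintaining the single-bit syndrome contribution X^(j+10) mod G by one modular doubling per step and XOR-accumulating it for each set bit; no register is ever fed message bits.
import Mathlib
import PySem

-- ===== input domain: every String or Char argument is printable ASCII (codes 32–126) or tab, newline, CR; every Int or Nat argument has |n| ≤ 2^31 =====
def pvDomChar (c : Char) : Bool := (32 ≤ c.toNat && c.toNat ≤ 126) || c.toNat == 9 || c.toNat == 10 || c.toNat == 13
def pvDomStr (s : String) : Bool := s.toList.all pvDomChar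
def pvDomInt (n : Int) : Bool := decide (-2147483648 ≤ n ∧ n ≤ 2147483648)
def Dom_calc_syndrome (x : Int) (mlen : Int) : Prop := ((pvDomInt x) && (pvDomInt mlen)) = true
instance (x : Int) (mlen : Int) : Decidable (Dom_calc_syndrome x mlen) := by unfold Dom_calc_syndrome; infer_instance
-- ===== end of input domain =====

-- B exploits GF(2)-linearity of the CRC: it XOR-accumulates per-bit syndrome contributions
-- X^(j+10) mod G over the set message bits, walking the message LSB-first with one modular
-- doubling per step — no shift register fed by message bits, no zero-padding pass.

-- ===== PORT A =====
def calc_syndrome (x : Int) (mlen : Int) : Int :=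
  -- reg = 0; plen = 10; first loop: for ii in range(mlen, 0, -1); second: for ii in range(plen, 0, -1)
  PySem.Int.band
    ((PySem.List.pyRange 10 0 (-1)).foldl
      (fun (reg : Int) (_ : Int) =>
        let r := reg <<< (1:Nat)
        if PySem.Int.band r ((1:Int) <<< (10:Nat)) ≠ 0 then PySem.Int.bxor r 0x5B9 else r)
      ((PySem.List.pyRange mlen 0 (-1)).foldl
        (fun (reg ii : Int) =>
          let r := PySem.Int.bor (reg <<< (1:Nat)) (PySem.Int.band (x >>> (ii - 1).toNat) 1)
          if PySem.Int.band r ((1:Int) <<< (10:Nat)) ≠ 0 then PySem.Int.bxor r 0x5B9 else r)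
        0))
    (((1:Int) <<< (10:Nat)) - 1)

-- ===== PORT B =====
def calc_syndrome_alt (x : Int) (mlen : Int) : Int :=
  -- syn = 0; t = 0x1B9; for j in range(mlen): if (x >> j) & 1: syn ^= t; t <<= 1; if t & 0x400: t ^= 0x5B9
  let st := (PySem.List.pyRange 0 mlen).foldl
    (fun (st : Int × Int) (j : Int) =>
      let syn := if PySem.Int.band (x >>> j.toNat) 1 ≠ 0 then PySem.Int.bxor st.1 st.2 else st.1
      let t0 := st.2 <<< (1:Nat)
      let t := if PySem.Int.band t0 0x400 ≠ 0 then PySem.Int.bxor t0 0x5B9 else t0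
      (syn, t))
    (0, 0x1B9)
  PySem.Int.band st.1 0x3FF

-- ===== PRECONDITION & SPEC =====
def Spec_calc_syndrome (x : Int) (mlen : Int) (out : Int) : Prop := out = calc_syndrome_alt x mlen
instance (x : Int) (mlen : Int) (out : Int) : Decidable (Spec_calc_syndrome x mlen out) := by unfold Spec_calc_syndrome; infer_instance

-- ===== CLAIM (what is proved, stated in full; the proofs are below) =====
def Claim_equal_calc_syndrome : Prop := ∀ (x : Int) (mlen : Int), Dom_calc_syndrome x mlen → Spec_calc_syndrome x mlen (calc_syndrome x mlen)

-- ===== LEMMAS AND PROOFS =====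

-- Nat-level models of the two programs (all register states are nonnegative)

-- the j-th bit of x (infinite two's complement), a Nat in {0,1}
def pvBit (x : Int) (j : Nat) : Nat := (PySem.Int.band (x >>> j) 1).toNat

-- one CRC doubling step mod G = 0x5B9 (A's second-loop body / B's t update)
def pvT (r : Nat) : Nat := if (r <<< 1) &&& 1024 ≠ 0 then (r <<< 1) ^^^ 1465 else (r <<< 1)

-- A's first-loop body, fed bit index j
def pvStep (x : Int) (r : Nat) (j : Nat) : Nat :=
  if ((r <<< 1) ||| pvBit x j) &&& 1024 ≠ 0 then ((r <<< 1) ||| pvBit x j) ^^^ 1465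
  else ((r <<< 1) ||| pvBit x j)

def pvDesc (n : Nat) : List Nat := (List.range n).map (fun k => n - 1 - k)

def pvA (x : Int) (n : Nat) : Nat := (pvDesc n).foldl (pvStep x) 0

def pvB (x : Int) (n : Nat) : Nat × Nat :=
  (List.range n).foldl (fun st j => (if pvBit x j ≠ 0 then st.1 ^^^ st.2 else st.1, pvT st.2)) (0, 441)

theorem pvBand1_nonneg (x : Int) (j : Nat) : 0 ≤ PySem.Int.band (x >>> j) 1 := by
  rw [PySem.Int.band_one]; exact PySem.Int.mod_nonneg _ (by norm_num)

theorem pvBit_le (x : Int) (j : Nat) : pvBit x j ≤ 1 := by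
  unfold pvBit
  have h2 : PySem.Int.band (x >>> j) 1 < 2 := by
    rw [PySem.Int.band_one]; exact PySem.Int.mod_lt _ (by norm_num)
  omega

theorem pvBand1_cast (x : Int) (j : Nat) : PySem.Int.band (x >>> j) 1 = ((pvBit x j : Nat) : Int) := by
  unfold pvBit; rw [Int.toNat_of_nonneg (pvBand1_nonneg x j)]

-- a ||| b = a ^^^ b on disjoint bit patterns
theorem pvOrXor (a b : Nat) (h : a &&& b = 0) : a ||| b = a ^^^ b := by
  apply Nat.eq_of_testBit_eq; intro i
  have := congrArg (fun n => n.testBit i) h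
  simp [Nat.testBit_and] at this
  by_cases ha : a.testBit i
  · simp [Nat.testBit_or, Nat.testBit_xor, ha, this ha]
  · simp [Nat.testBit_or, Nat.testBit_xor, ha]

theorem pvShlOrBit (r b : Nat) (hb : b ≤ 1) : (r <<< 1) ||| b = (r <<< 1) ^^^ b := by
  apply pvOrXor
  interval_cases b <;> simp [Nat.shiftLeft_eq]

theorem pvXorBitAnd (s b : Nat) (hb : b ≤ 1) : (s ^^^ b) &&& 1024 = s &&& 1024 := by
  rw [Nat.and_xor_distrib_right]
  interval_cases b <;> simp

-- A's step = doubling step XOR the incoming bit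
theorem pvStep_eq (x : Int) (r : Nat) (j : Nat) : pvStep x r j = pvT r ^^^ pvBit x j := by
  unfold pvStep pvT
  rw [pvShlOrBit r _ (pvBit_le x j), pvXorBitAnd _ _ (pvBit_le x j)]
  split
  · simp [Nat.xor_assoc, Nat.xor_comm]
  · rfl

theorem pvT_zero : pvT 0 = 0 := by decide

-- s &&& 2^10 is 0 or 1024
theorem pvAnd1024 (s : Nat) (h : s &&& 1024 ≠ 0) : s &&& 1024 = 1024 := by
  have := Nat.and_two_pow s 10
  norm_num at this
  rcases Bool.eq_false_or_eq_true (s.testBit 10) with hb | hb <;> simp [hb] at this <;> omega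

-- the doubling step is GF(2)-linear
theorem pvT_linear (u v : Nat) : pvT (u ^^^ v) = pvT u ^^^ pvT v := by
  unfold pvT
  rw [Nat.shiftLeft_xor_distrib]
  have hd : ((u <<< 1) ^^^ (v <<< 1)) &&& 1024 = ((u <<< 1) &&& 1024) ^^^ ((v <<< 1) &&& 1024) :=
    Nat.and_xor_distrib_right
  by_cases hu : (u <<< 1) &&& 1024 = 0 <;> by_cases hv : (v <<< 1) &&& 1024 = 0
  · simp [hd, hu, hv]
  · rw [if_pos (by rw [hd, hu]; simpa using hv), if_neg (by simpa using hu), if_pos hv]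
    simp [Nat.xor_assoc, Nat.xor_comm, Nat.xor_left_comm]
  · rw [if_pos (by rw [hd, hv]; simpa using hu), if_pos hu, if_neg (by simpa using hv)]
    simp [Nat.xor_assoc, Nat.xor_comm, Nat.xor_left_comm]
  · rw [if_neg (by rw [hd, pvAnd1024 _ hu, pvAnd1024 _ hv]; simp), if_pos hu, if_pos hv]
    simp [Nat.xor_assoc, Nat.xor_comm, Nat.xor_left_comm]

theorem pvTpow_linear (k u v : Nat) : pvT^[k] (u ^^^ v) = pvT^[k] u ^^^ pvT^[k] v := by
  induction k generalizing u v with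
  | zero => simp
  | succ k ih => simp only [Function.iterate_succ_apply, pvT_linear, ih]

theorem pvTpow_zero (k : Nat) : pvT^[k] 0 = 0 := by
  induction k with
  | zero => rfl
  | succ k ih => simp only [Function.iterate_succ_apply, pvT_zero, ih]

theorem pvDesc_succ (n : Nat) : pvDesc (n + 1) = n :: pvDesc n := by
  unfold pvDesc
  rw [List.range_succ_eq_map, List.map_cons, List.map_map]
  refine congrArg₂ _ (by omega) (List.map_congr_left ?_)
  intro k _; simp; omega

theorem pvDesc_length (n : Nat) : (pvDesc n).length = n := by
  unfold pvDesc; simp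

-- shifting the start state out of A's fold
theorem pvFold_shift (x : Int) (l : List Nat) (r s : Nat) :
    l.foldl (pvStep x) (r ^^^ s) = pvT^[l.length] r ^^^ l.foldl (pvStep x) s := by
  induction l generalizing r s with
  | nil => simp
  | cons j t ih =>
    rw [List.foldl_cons, List.foldl_cons]
    have h1 : pvStep x (r ^^^ s) j = pvT r ^^^ pvStep x s j := by
      rw [pvStep_eq, pvStep_eq, pvT_linear, Nat.xor_assoc]
    rw [h1, ih (pvT r) (pvStep x s j), List.length_cons, ← Function.iterate_succ_apply]

theorem pvA_succ (x : Int) (n : Nat) : pvA x (n + 1) = pvT^[n] (pvBit x n) ^^^ pvA x n := by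
  unfold pvA
  rw [pvDesc_succ, List.foldl_cons]
  have h0 : pvStep x 0 n = pvBit x n ^^^ 0 := by rw [pvStep_eq, pvT_zero, Nat.zero_xor, Nat.xor_zero]
  rw [h0, pvFold_shift, pvDesc_length]

theorem pvB_succ (x : Int) (n : Nat) :
    pvB x (n + 1) = (if pvBit x n ≠ 0 then (pvB x n).1 ^^^ (pvB x n).2 else (pvB x n).1,
                     pvT (pvB x n).2) := by
  unfold pvB
  rw [List.range_succ, List.foldl_append, List.foldl_cons, List.foldl_nil]

theorem pvT10_one : pvT^[10] 1 = 441 := by decide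

-- the bridge: A's register after its two loops = B's accumulated syndrome
theorem pvMain (x : Int) (n : Nat) :
    pvT^[10] (pvA x n) = (pvB x n).1 ∧ (pvB x n).2 = pvT^[n] 441 := by
  induction n with
  | zero =>
    constructor
    · show pvT^[10] ((pvDesc 0).foldl (pvStep x) 0) = 0
      simp [pvDesc, pvTpow_zero]
    · rfl
  | succ n ih =>
    obtain ⟨ih1, ih2⟩ := ih
    rw [pvA_succ, pvTpow_linear, ih1, pvB_succ, ih2]
    have hiter : pvT^[10] (pvT^[n] (pvBit x n)) = pvT^[n] (pvT^[10] (pvBit x n)) := by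
      rw [← Function.iterate_add_apply, ← Function.iterate_add_apply, Nat.add_comm]
    have hb := pvBit_le x n
    constructor
    · interval_cases h : pvBit x n
      · simp [pvTpow_zero]
      · rw [hiter, pvT10_one]
        simp only [if_pos (by omega : (1:Nat) ≠ 0)]
        rw [Nat.xor_comm]
    · show pvT (pvT^[n] 441) = pvT^[n + 1] 441
      exact (Function.iterate_succ_apply' pvT n 441).symm

-- ===== casting the Int ports down to the Nat models =====

theorem pvCastShl (r : Nat) : ((r : Int)) <<< (1 : Nat) = ((r <<< 1 : Nat) : Int) := by
  push_cast; ring_nf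

theorem pvC1024 : ((1:Int) <<< (10:Nat)) = ((1024 : Nat) : Int) := by decide
theorem pvC1465 : (0x5B9 : Int) = ((1465 : Nat) : Int) := by decide
theorem pvC1023 : ((1:Int) <<< (10:Nat)) - 1 = ((1023 : Nat) : Int) := by decide

-- A's first-loop body on a cast state
theorem pvStepA_cast (x : Int) (r : Nat) (ii : Int) :
    (let s := PySem.Int.bor (((r : Int)) <<< (1:Nat)) (PySem.Int.band (x >>> (ii - 1).toNat) 1)
     if PySem.Int.band s ((1:Int) <<< (10:Nat)) ≠ 0 then PySem.Int.bxor s 0x5B9 else s)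
      = ((pvStep x r (ii - 1).toNat : Nat) : Int) := by
  show (if _ then _ else _) = _
  rw [pvCastShl, pvBand1_cast x ((ii - 1).toNat), PySem.Int.bor_natCast, pvC1024, pvC1465,
      PySem.Int.band_natCast, PySem.Int.bxor_natCast]
  unfold pvStep
  by_cases h : ((r <<< 1) ||| pvBit x ((ii - 1).toNat)) &&& 1024 = 0
  · rw [if_neg (not_ne_iff.mpr (by rw [h]; rfl)), if_neg (not_ne_iff.mpr h)]
  · rw [if_pos (Int.natCast_ne_zero.mpr h), if_pos h]

theorem pvFoldA_cast (x : Int) (l : List Int) (r : Nat) :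
    l.foldl
      (fun (reg ii : Int) =>
        let s := PySem.Int.bor (reg <<< (1:Nat)) (PySem.Int.band (x >>> (ii - 1).toNat) 1)
        if PySem.Int.band s ((1:Int) <<< (10:Nat)) ≠ 0 then PySem.Int.bxor s 0x5B9 else s)
      ((r : Nat) : Int)
    = ((l.foldl (fun (r : Nat) (ii : Int) => pvStep x r (ii - 1).toNat) r : Nat) : Int) := by
  induction l generalizing r with
  | nil => rfl
  | cons ii t ih => rw [List.foldl_cons, List.foldl_cons, pvStepA_cast, ih]

-- A's second-loop body on a cast state
theorem pvStepT_cast (r : Nat) :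
    (let s := ((r : Int)) <<< (1:Nat)
     if PySem.Int.band s ((1:Int) <<< (10:Nat)) ≠ 0 then PySem.Int.bxor s 0x5B9 else s)
      = ((pvT r : Nat) : Int) := by
  show (if _ then _ else _) = _
  rw [pvCastShl, pvC1024, pvC1465, PySem.Int.band_natCast, PySem.Int.bxor_natCast]
  unfold pvT
  by_cases h : (r <<< 1) &&& 1024 = 0
  · rw [if_neg (not_ne_iff.mpr (by rw [h]; rfl)), if_neg (not_ne_iff.mpr h)]
  · rw [if_pos (Int.natCast_ne_zero.mpr h), if_pos h]

theorem pvFoldT_cast (l : List Int) (r : Nat) :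
    l.foldl
      (fun (reg : Int) (_ : Int) =>
        let s := reg <<< (1:Nat)
        if PySem.Int.band s ((1:Int) <<< (10:Nat)) ≠ 0 then PySem.Int.bxor s 0x5B9 else s)
      ((r : Nat) : Int)
    = ((pvT^[l.length] r : Nat) : Int) := by
  induction l generalizing r with
  | nil => rfl
  | cons ii t ih =>
    rw [List.foldl_cons, List.length_cons, pvStepT_cast, ih, ← Function.iterate_succ_apply]

-- B's loop body on a cast pair state
theorem pvFoldB_cast (x : Int) (l : List Nat) (syn t : Nat) :
    (l.map (fun (k : Nat) => (k : Int))).foldl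
      (fun (st : Int × Int) (j : Int) =>
        let syn := if PySem.Int.band (x >>> j.toNat) 1 ≠ 0 then PySem.Int.bxor st.1 st.2 else st.1
        let t0 := st.2 <<< (1:Nat)
        let t := if PySem.Int.band t0 0x400 ≠ 0 then PySem.Int.bxor t0 0x5B9 else t0
        (syn, t))
      (((syn : Nat) : Int), ((t : Nat) : Int))
    = (((l.foldl (fun st j => (if pvBit x j ≠ 0 then st.1 ^^^ st.2 else st.1, pvT st.2)) (syn, t)).1 : Int),
       ((l.foldl (fun st j => (if pvBit x j ≠ 0 then st.1 ^^^ st.2 else st.1, pvT st.2)) (syn, t)).2 : Int)) := by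
  induction l generalizing syn t with
  | nil => rfl
  | cons j l ih =>
    rw [List.map_cons, List.foldl_cons, List.foldl_cons]
    have hstep :
        (let syn' := if PySem.Int.band (x >>> ((j : Int)).toNat) 1 ≠ 0 then PySem.Int.bxor ((syn:Nat):Int) ((t:Nat):Int) else ((syn:Nat):Int)
         let t0 := ((t:Nat):Int) <<< (1:Nat)
         let t' := if PySem.Int.band t0 0x400 ≠ 0 then PySem.Int.bxor t0 0x5B9 else t0
         ((syn', t') : Int × Int))
        = ((((if pvBit x j ≠ 0 then syn ^^^ t else syn) : Nat) : Int), ((pvT t : Nat) : Int)) := by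
      show ((if _ then _ else _, if _ then _ else _) : Int × Int) = _
      have hj : ((j : Int)).toNat = j := Int.toNat_natCast j
      have hx400 : (0x400 : Int) = ((1024 : Nat) : Int) := by decide
      rw [hj, pvBand1_cast x j, pvCastShl, hx400, pvC1465, PySem.Int.band_natCast,
          PySem.Int.bxor_natCast, PySem.Int.bxor_natCast]
      refine congrArg₂ _ ?_ ?_
      · by_cases h : pvBit x j = 0
        · rw [if_neg (not_ne_iff.mpr (by rw [h]; rfl)), if_neg (not_ne_iff.mpr h)]
        · rw [if_pos (Int.natCast_ne_zero.mpr h), if_pos h]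
      · unfold pvT
        by_cases h : (t <<< 1) &&& 1024 = 0
        · rw [if_neg (not_ne_iff.mpr (by rw [h]; rfl)), if_neg (not_ne_iff.mpr h)]
        · rw [if_pos (Int.natCast_ne_zero.mpr h), if_pos h]
    rw [hstep, ih]

-- first loop of A expressed through pvA (for 0 ≤ mlen, n = mlen.toNat)
theorem pvAloop (x : Int) (mlen : Int) (h : 0 ≤ mlen) :
    (PySem.List.pyRange mlen 0 (-1)).foldl
      (fun (reg ii : Int) =>
        let s := PySem.Int.bor (reg <<< (1:Nat)) (PySem.Int.band (x >>> (ii - 1).toNat) 1)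
        if PySem.Int.band s ((1:Int) <<< (10:Nat)) ≠ 0 then PySem.Int.bxor s 0x5B9 else s)
      0
    = ((pvA x mlen.toNat : Nat) : Int) := by
  rw [PySem.List.pyRange_neg_one, show mlen - 0 = mlen from by ring]
  have hA := pvFoldA_cast x ((List.range mlen.toNat).map (fun (k : Nat) => mlen - (k : Int))) 0
  rw [show (((0 : Nat)) : Int) = (0 : Int) from rfl] at hA
  rw [hA, List.foldl_map]
  unfold pvA pvDesc
  rw [List.foldl_map]
  refine congrArg _ (PySem.List.foldl_congr_mem _ _ _ _ ?_)
  intro acc k hk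
  rw [List.mem_range] at hk
  have : (mlen - (k : Int) - 1).toNat = mlen.toNat - 1 - k := by omega
  rw [this]

-- ===== VERDICT (by name: the statement is the Claim_ definition above) =====
theorem calc_syndrome_spec : Claim_equal_calc_syndrome := by
  intro x mlen _
  unfold Spec_calc_syndrome calc_syndrome calc_syndrome_alt
  show PySem.Int.band _ (((1:Int) <<< (10:Nat)) - 1) = PySem.Int.band _ 0x3FF
  have h1023 : (0x3FF : Int) = ((1023 : Nat) : Int) := by decide
  have hlen : (PySem.List.pyRange 10 0 (-1)).length = 10 := by decide
  by_cases hm : 0 ≤ mlen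
  · -- A side down to the Nat model
    rw [pvAloop x mlen hm, pvFoldT_cast, hlen]
    -- B side down to the Nat model
    have hR : PySem.List.pyRange 0 mlen = List.map (fun (k : Nat) => ((k : Nat) : Int)) (List.range mlen.toNat) := by
      rw [← PySem.List.pyRange_zero_natCast, Int.toNat_of_nonneg hm]
    rw [hR]
    have hB := pvFoldB_cast x (List.range mlen.toNat) 0 441
    rw [show (((0 : Nat)) : Int) = (0 : Int) from rfl,
        show (((441 : Nat)) : Int) = (441 : Int) from by norm_num] at hB
    rw [hB, pvC1023, h1023, PySem.Int.band_natCast, PySem.Int.band_natCast]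
    exact congrArg _ (congrArg (· &&& 1023) (pvMain x mlen.toNat).1)
  · -- mlen < 0: both loops are empty and both sides are 0
    rw [PySem.List.pyRange_neg_one_eq_nil (by omega : mlen ≤ 0), List.foldl_nil,
        show PySem.List.pyRange 0 mlen = [] from by
          simp [PySem.List.pyRange, show ¬(0:Int) < mlen from by omega],
        List.foldl_nil]
    have hT := pvFoldT_cast (PySem.List.pyRange 10 0 (-1)) 0
    rw [show (((0 : Nat)) : Int) = (0 : Int) from rfl] at hT
    rw [hT, hlen, pvTpow_zero, pvC1023, PySem.Int.band_natCast, h1023]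
    decide
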